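-- pv_equiv track=rewrite | github.com/wetherc/adventOfCode | 2024/day_02/solution.py | get_report_dampened_safety
-- ===== SOURCE A (Python) =====
-- import copy
-- from typing import List
--
-- def _check_asc(report: List[int]) -> List[bool]:
--     return [report[i] < report[i + 1] for i in range(len(report) - 1)]
--
-- def _check_desc(report: List[int]) -> List[bool]:
--     return [report[i] > report[i + 1] for i in range(len(report) - 1)]
--
-- def _check_gaps(report: List[int]) -> List[bool]:
--     return [0 < abs(report[i] - report[i + 1]) <= 3 for i in range(len(report) - 1)]
--
-- def get_report_dampened_safety(input: List[List[int]]) -> List[bool]: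
--     out = []
--     for report in input:
--         valid = False
--         for idx in range(len(report)):
--             _report = copy.deepcopy(report)
--             _report.pop(idx)
--             valid = max(
--                 valid,
--                 (
--                     all(_check_asc(_report)) or
--                     all(_check_desc(_report))
--                 ) and all(_check_gaps(_report))
--             )
--         out.append(valid)
--
--     return out
-- ===== SOURCE B (Python) =====
-- def _asc_ok(a, b):
--     return a < b and b - a <= 3
--
-- def _desc_ok(a, b):
--     return b < a and a - b <= 3
--
-- def _chain_all(ok, r):
--     return all(ok(a, b) for a, b in zip(r, r[1:]))
--
-- def _first_bad(ok, r):
--     i = 0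
--     for a, b in zip(r, r[1:]):
--         if not ok(a, b):
--             return i
--         i += 1
--     return None
--
-- def _safe(r):
--     return _chain_all(_asc_ok, r) or _chain_all(_desc_ok, r)
--
-- def _dampened(r):
--     if not r:
--         return False  # no level to remove
--     if _safe(r):
--         return True
--     # r violates both directions, so both first violations exist; only a removal
--     # adjacent to a first violation can repair that direction.
--     cands = []
--     for ok in (_asc_ok, _desc_ok):
--         i = _first_bad(ok, r)
--         cands.extend((i, i + 1))
--     return any(_safe(r[:c] + r[c + 1:]) for c in cands)
--
-- def get_report_dampened_safety(input):
--     return [_dampened(r) for r in input]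
-- ===== Notes on version B (the rewrite author's own statement) =====
-- stated objective: faster
-- what changed: A deep-copies and re-checks the whole report for every possible removal (three boolean lists per candidate); B does one pass per direction to find the first monotone-with-gap violation and tests only the at most four removals adjacent to those violations (plus an early accept if the report is already safe).
import Mathlib
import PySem

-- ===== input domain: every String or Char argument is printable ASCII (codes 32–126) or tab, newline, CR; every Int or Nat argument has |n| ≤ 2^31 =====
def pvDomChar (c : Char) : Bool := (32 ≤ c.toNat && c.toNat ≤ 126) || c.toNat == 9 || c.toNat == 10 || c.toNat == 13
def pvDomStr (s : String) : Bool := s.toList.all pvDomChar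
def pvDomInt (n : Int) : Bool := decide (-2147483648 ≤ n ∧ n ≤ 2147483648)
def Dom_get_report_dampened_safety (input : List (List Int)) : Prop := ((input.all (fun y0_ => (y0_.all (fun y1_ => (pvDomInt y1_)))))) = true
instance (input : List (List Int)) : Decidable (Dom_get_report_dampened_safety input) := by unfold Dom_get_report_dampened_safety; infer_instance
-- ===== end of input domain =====

-- B replaces A's try-every-removal O(n^2) scan per report by an O(n) check: a report is
-- dampened-safe iff it is already safe or removing one of the (at most 4) elements adjacent
-- to the first ascending/descending violation makes it safe.

-- ===== PORT A =====
-- report[i] is always in range here (i < len-1), so getD 0 is exact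
def pvCheckAsc (report : List Int) : List Bool :=
  (List.range (report.length - 1)).map (fun i => decide (report.getD i 0 < report.getD (i+1) 0))

def pvCheckDesc (report : List Int) : List Bool :=
  (List.range (report.length - 1)).map (fun i => decide (report.getD i 0 > report.getD (i+1) 0))

def pvCheckGaps (report : List Int) : List Bool :=
  (List.range (report.length - 1)).map
    (fun i => decide (0 < |report.getD i 0 - report.getD (i+1) 0| ∧ |report.getD i 0 - report.getD (i+1) 0| ≤ 3))

def get_report_dampened_safety (input : List (List Int)) : List Bool :=
  input.map (fun report =>
    (List.range report.length).foldl (fun valid idx =>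
      -- _report = deepcopy(report); _report.pop(idx)  (idx < len, so pop is take ++ drop)
      let _report := report.take idx ++ report.drop (idx+1)
      -- max on two bools is boolean or
      max valid (((pvCheckAsc _report).all id || (pvCheckDesc _report).all id)
                  && (pvCheckGaps _report).all id)) false)

-- ===== PORT B =====
def ascOk (a b : Int) : Bool := decide (a < b ∧ b - a ≤ 3)

def descOk (a b : Int) : Bool := decide (b < a ∧ a - b ≤ 3)

-- all(ok(a, b) for a, b in zip(r, r[1:]))
def chainAll (ok : Int → Int → Bool) (r : List Int) : Bool :=
  (r.zip (r.drop 1)).all (fun p => ok p.1 p.2)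

-- the counting loop over zip(r, r[1:]): first index whose adjacent pair violates ok
def firstBad (ok : Int → Int → Bool) : List Int → Option Nat
  | a :: b :: t => if !(ok a b) then some 0 else (firstBad ok (b :: t)).map (· + 1)
  | _ => none

def safeB (r : List Int) : Bool := chainAll ascOk r || chainAll descOk r

-- r[:c] + r[c+1:]  (c : Nat)
def removeAt (c : Nat) (r : List Int) : List Int := r.take c ++ r.drop (c+1)

def dampened (r : List Int) : Bool :=
  if r = [] then false
  else if safeB r then true
  else
    match firstBad ascOk r, firstBad descOk r with
    | some ia, some idd => [ia, ia+1, idd, idd+1].any (fun c => safeB (removeAt c r))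
    | _, _ => false  -- unreachable: r is unsafe in both directions here, so both exist

def get_report_dampened_safety_alt (input : List (List Int)) : List Bool :=
  input.map dampened

-- ===== PRECONDITION & SPEC =====
def Spec_get_report_dampened_safety (input : List (List Int)) (out : List Bool) : Prop := out = get_report_dampened_safety_alt input
instance (input : List (List Int)) (out : List Bool) : Decidable (Spec_get_report_dampened_safety input out) := by unfold Spec_get_report_dampened_safety; infer_instance

-- ===== CLAIM (what is proved, stated in full; the proofs are below) =====
def Claim_equal_get_report_dampened_safety : Prop := ∀ (input : List (List Int)), Dom_get_report_dampened_safety input → Spec_get_report_dampened_safety input (get_report_dampened_safety input)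

-- ===== LEMMAS AND PROOFS =====

-- adjacency chain, recursive form (proof vehicle relating both ports)
def chainRec (ok : Int → Int → Bool) : List Int → Bool
  | a :: b :: t => ok a b && chainRec ok (b :: t)
  | _ => true

theorem chainAll_eq (ok : Int → Int → Bool) : ∀ r, chainAll ok r = chainRec ok r
  | [] => rfl
  | [_] => rfl
  | a :: b :: t => by
    simp [chainAll, chainRec] at *
    have := chainAll_eq ok (b :: t)
    simp [chainAll] at this
    simp [this]

theorem rangeAll_eq (P : Int → Int → Bool) :
    ∀ r : List Int,
      (List.range (r.length - 1)).all (fun i => P (r.getD i 0) (r.getD (i+1) 0)) = chainRec P r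
  | [] => rfl
  | [_] => rfl
  | a :: b :: t => by
    have ih := rangeAll_eq P (b :: t)
    simp only [List.length_cons, Nat.add_sub_cancel] at ih ⊢
    rw [List.range_succ_eq_map, List.all_cons, List.all_map]
    have hfun : ((fun i => P ((a :: b :: t).getD i 0) ((a :: b :: t).getD (i+1) 0)) ∘ Nat.succ)
        = fun i => P ((b :: t).getD i 0) ((b :: t).getD (i+1) 0) := by
      funext i
      simp [Function.comp]
    rw [hfun, ih]
    rfl

theorem chainRec_and (P Q : Int → Int → Bool) :
    ∀ r, (chainRec P r && chainRec Q r) = chainRec (fun a b => P a b && Q a b) r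
  | [] => rfl
  | [_] => rfl
  | a :: b :: t => by
    have ih := chainRec_and P Q (b :: t)
    show ((P a b && chainRec P (b :: t)) && (Q a b && chainRec Q (b :: t))) = _
    rw [show chainRec (fun a b => P a b && Q a b) (a :: b :: t)
        = ((P a b && Q a b) && chainRec (fun a b => P a b && Q a b) (b :: t)) from rfl, ← ih]
    cases P a b <;> cases Q a b <;> simp

theorem pair_asc (a b : Int) :
    (decide (a < b) && decide (0 < |a - b| ∧ |a - b| ≤ 3)) = ascOk a b := by
  show _ = decide (a < b ∧ b - a ≤ 3)
  rw [← Bool.decide_and, decide_eq_decide]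
  rcases abs_cases (a - b) with ⟨h1, _⟩ | ⟨h1, _⟩ <;> rw [h1] <;> omega

theorem pair_desc (a b : Int) :
    (decide (a > b) && decide (0 < |a - b| ∧ |a - b| ≤ 3)) = descOk a b := by
  show _ = decide (b < a ∧ a - b ≤ 3)
  rw [← Bool.decide_and, decide_eq_decide]
  rcases abs_cases (a - b) with ⟨h1, _⟩ | ⟨h1, _⟩ <;> rw [h1] <;> omega

-- A's per-candidate safety test equals B's combined-pair chains
theorem safeA_eq (r : List Int) :
    (((pvCheckAsc r).all id || (pvCheckDesc r).all id) && (pvCheckGaps r).all id)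
      = (chainRec ascOk r || chainRec descOk r) := by
  simp only [pvCheckAsc, pvCheckDesc, pvCheckGaps, List.all_map]
  have hid : ∀ (f : Nat → Bool) (l : List Nat), l.all (id ∘ f) = l.all f := by
    intro f l; rfl
  rw [hid, hid, hid,
      rangeAll_eq (fun a b => decide (a < b)) r,
      rangeAll_eq (fun a b => decide (a > b)) r,
      rangeAll_eq (fun a b => decide (0 < |a - b| ∧ |a - b| ≤ 3)) r,
      Bool.and_or_distrib_right, chainRec_and, chainRec_and]
  congr 1
  · exact congrArg (fun f => chainRec f r) (funext fun a => funext fun b => pair_asc a b)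
  · exact congrArg (fun f => chainRec f r) (funext fun a => funext fun b => pair_desc a b)

theorem foldl_or (f : Nat → Bool) : ∀ (l : List Nat) (b : Bool),
    l.foldl (fun v i => v || f i) b = (b || l.any f)
  | [], b => by simp
  | i :: l, b => by
    simp only [List.foldl_cons, List.any_cons, foldl_or f l]
    cases b <;> cases f i <;> simp

theorem chainRec_append_left (ok : Int → Int → Bool) :
    ∀ (xs ys : List Int), chainRec ok (xs ++ ys) = true → chainRec ok xs = true
  | [], _, _ => rfl
  | [_], _, _ => rfl
  | a :: b :: t, ys, h => by
    have h' : (ok a b && chainRec ok ((b :: t) ++ ys)) = true := h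
    simp only [Bool.and_eq_true] at h'
    show (ok a b && chainRec ok (b :: t)) = true
    simp [h'.1, chainRec_append_left ok (b :: t) ys h'.2]

theorem chainRec_take (ok : Int → Int → Bool) (r : List Int) (k : Nat)
    (h : chainRec ok r = true) : chainRec ok (r.take k) = true :=
  chainRec_append_left ok (r.take k) (r.drop k) (by rw [List.take_append_drop]; exact h)

theorem chainRec_false_of_bad (ok : Int → Int → Bool) :
    ∀ (r : List Int) (i : Nat), i + 1 < r.length →
      ok (r.getD i 0) (r.getD (i+1) 0) = false → chainRec ok r = false
  | [], i, hi, _ => by simp at hi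
  | [_], i, hi, _ => by simp at hi
  | a :: b :: t, 0, _, hbad => by
    show (ok a b && chainRec ok (b :: t)) = false
    simp only [List.getD_cons_zero, List.getD_cons_succ] at hbad
    rw [hbad]; rfl
  | a :: b :: t, i + 1, hi, hbad => by
    show (ok a b && chainRec ok (b :: t)) = false
    simp only [List.getD_cons_succ] at hbad
    rw [chainRec_false_of_bad ok (b :: t) i (by simp at hi ⊢; omega) hbad]
    simp

theorem firstBad_none_iff (ok : Int → Int → Bool) :
    ∀ r, firstBad ok r = none ↔ chainRec ok r = true
  | [] => by simp [firstBad, chainRec]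
  | [_] => by simp [firstBad, chainRec]
  | a :: b :: t => by
    have ih := firstBad_none_iff ok (b :: t)
    show (if !(ok a b) then some 0 else (firstBad ok (b :: t)).map (· + 1)) = none
        ↔ (ok a b && chainRec ok (b :: t)) = true
    cases hab : ok a b <;> simp [ih]

theorem firstBad_some_lt (ok : Int → Int → Bool) :
    ∀ r i, firstBad ok r = some i → i + 1 < r.length
  | [], i, h => by simp [firstBad] at h
  | [_], i, h => by simp [firstBad] at h
  | a :: b :: t, i, h => by
    by_cases hab : ok a b = true
    · have h' : (firstBad ok (b :: t)).map (· + 1) = some i := by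
        simpa [firstBad, hab] using h
      rcases Option.map_eq_some_iff.mp h' with ⟨j, hj, rfl⟩
      have := firstBad_some_lt ok (b :: t) j hj
      simp at this ⊢; omega
    · have : some 0 = some i := by
        simpa [firstBad, Bool.eq_false_iff.mpr hab] using h
      simp at this; subst this; simp

theorem firstBad_some_bad (ok : Int → Int → Bool) :
    ∀ r i, firstBad ok r = some i → ok (r.getD i 0) (r.getD (i+1) 0) = false
  | [], i, h => by simp [firstBad] at h
  | [_], i, h => by simp [firstBad] at h
  | a :: b :: t, i, h => by
    by_cases hab : ok a b = true
    · have h' : (firstBad ok (b :: t)).map (· + 1) = some i := by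
        simpa [firstBad, hab] using h
      rcases Option.map_eq_some_iff.mp h' with ⟨j, hj, rfl⟩
      simpa [List.getD_cons_succ] using firstBad_some_bad ok (b :: t) j hj
    · have : some 0 = some i := by
        simpa [firstBad, Bool.eq_false_iff.mpr hab] using h
      simp at this; subst this
      simpa using Bool.eq_false_iff.mpr hab

theorem length_removeAt (j : Nat) (r : List Int) :
    (removeAt j r).length = min j r.length + (r.length - (j+1)) := by
  simp [removeAt]

-- a violation not adjacent to the removed index survives the removal
theorem bad_remove (ok : Int → Int → Bool) (r : List Int) (i j : Nat)
    (hi : i + 1 < r.length)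
    (hbad : ok (r.getD i 0) (r.getD (i+1) 0) = false)
    (hj1 : j ≠ i) (hj2 : j ≠ i + 1) :
    chainRec ok (removeAt j r) = false := by
  have hget : ∀ k : Nat, (removeAt j r)[k]? =
      if k < min j r.length then r[k]? else r[k + (j+1) - min j r.length]? := by
    intro k
    simp only [removeAt, List.getElem?_append, List.length_take]
    split
    · exact List.getElem?_take_of_lt (by omega)
    · rw [List.getElem?_drop]; congr 1; omega
  rcases Nat.lt_or_ge j i with hji | hji
  · -- j < i : the pair sits at (i-1, i) after removal
    apply chainRec_false_of_bad ok _ (i - 1)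
    · rw [length_removeAt]; omega
    · have h1 : (removeAt j r).getD (i-1) 0 = r.getD i 0 := by
        rw [List.getD_eq_getElem?_getD, List.getD_eq_getElem?_getD, hget]
        rw [if_neg (by omega)]
        congr 2; omega
      have h2 : (removeAt j r).getD (i-1+1) 0 = r.getD (i+1) 0 := by
        rw [List.getD_eq_getElem?_getD, List.getD_eq_getElem?_getD, hget]
        rw [if_neg (by omega)]
        congr 2; omega
      rw [h1, h2]; exact hbad
  · -- j ≥ i + 2 : the pair is untouched at (i, i+1)
    have hji2 : i + 2 ≤ j := by omega
    apply chainRec_false_of_bad ok _ i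
    · rw [length_removeAt]; omega
    · have h1 : (removeAt j r).getD i 0 = r.getD i 0 := by
        rw [List.getD_eq_getElem?_getD, List.getD_eq_getElem?_getD, hget,
            if_pos (by omega)]
      have h2 : (removeAt j r).getD (i+1) 0 = r.getD (i+1) 0 := by
        rw [List.getD_eq_getElem?_getD, List.getD_eq_getElem?_getD, hget,
            if_pos (by omega)]
      rw [h1, h2]; exact hbad

-- per-report equivalence: A's try-every-removal any equals B's dampened
theorem report_eq (r : List Int) :
    (List.range r.length).foldl (fun valid idx =>
      let _report := r.take idx ++ r.drop (idx+1)
      max valid (((pvCheckAsc _report).all id || (pvCheckDesc _report).all id)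
                  && (pvCheckGaps _report).all id)) false = dampened r := by
  have hmax : ∀ x y : Bool, max x y = (x || y) := by decide
  have hbody : (fun (valid : Bool) (idx : Nat) =>
      let _report := r.take idx ++ r.drop (idx+1)
      max valid (((pvCheckAsc _report).all id || (pvCheckDesc _report).all id)
                  && (pvCheckGaps _report).all id))
      = fun valid idx => valid ||
          (chainRec ascOk (removeAt idx r) || chainRec descOk (removeAt idx r)) := by
    funext valid idx
    show max valid _ = _
    rw [hmax, safeA_eq (r.take idx ++ r.drop (idx+1))]
    rfl
  rw [hbody, foldl_or, Bool.false_or]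
  -- now: (range n).any (fun idx => S (removeAt idx r)) = dampened r
  unfold dampened
  by_cases hnil : r = []
  · subst hnil; simp
  · rw [if_neg hnil]
    have hsafe : safeB r = (chainRec ascOk r || chainRec descOk r) := by
      simp [safeB, chainAll_eq]
    by_cases hs : safeB r = true
    · rw [if_pos hs]
      rw [hsafe] at hs
      have hn : 0 < r.length := List.length_pos_iff.mpr hnil
      apply List.any_eq_true.mpr
      refine ⟨r.length - 1, List.mem_range.mpr (by omega), ?_⟩
      have hrm : removeAt (r.length - 1) r = r.take (r.length - 1) := by
        simp only [removeAt]
        rw [show r.length - 1 + 1 = r.length by omega, List.drop_length, List.append_nil]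
      show (chainRec ascOk (removeAt (r.length - 1) r)
              || chainRec descOk (removeAt (r.length - 1) r)) = true
      rw [hrm]
      simp only [Bool.or_eq_true] at hs ⊢
      rcases hs with h | h
      · exact Or.inl (chainRec_take _ _ _ h)
      · exact Or.inr (chainRec_take _ _ _ h)
    · rw [if_neg hs]
      rw [hsafe] at hs
      simp only [Bool.or_eq_true, not_or, Bool.not_eq_true] at hs
      obtain ⟨ha, hd⟩ := hs
      obtain ⟨ia, hia⟩ : ∃ ia, firstBad ascOk r = some ia := by
        cases h : firstBad ascOk r with
        | none => rw [(firstBad_none_iff ascOk r).mp h] at ha; cases ha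
        | some i => exact ⟨i, rfl⟩
      obtain ⟨idd, hidd⟩ : ∃ idd, firstBad descOk r = some idd := by
        cases h : firstBad descOk r with
        | none => rw [(firstBad_none_iff descOk r).mp h] at hd; cases hd
        | some i => exact ⟨i, rfl⟩
      rw [hia, hidd]
      have hsafeB : ∀ x, safeB x = (chainRec ascOk x || chainRec descOk x) := by
        intro x; simp [safeB, chainAll_eq]
      show (List.range r.length).any (fun idx => chainRec ascOk (removeAt idx r) || chainRec descOk (removeAt idx r))
          = ([ia, ia+1, idd, idd+1].any fun c => safeB (removeAt c r))
      apply Bool.eq_iff_iff.mpr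
      rw [List.any_eq_true, List.any_eq_true]
      constructor
      · rintro ⟨j, hjmem, hjs⟩
        simp only [Bool.or_eq_true] at hjs
        have hlt_a := firstBad_some_lt ascOk r ia hia
        have hbad_a := firstBad_some_bad ascOk r ia hia
        have hlt_d := firstBad_some_lt descOk r idd hidd
        have hbad_d := firstBad_some_bad descOk r idd hidd
        rcases hjs with hja | hjd
        · have hj : j = ia ∨ j = ia + 1 := by
            by_contra hc
            push Not at hc
            rw [bad_remove ascOk r ia j hlt_a hbad_a hc.1 hc.2] at hja
            cases hja
          refine ⟨j, ?_, ?_⟩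
          · rcases hj with rfl | rfl <;> simp
          · rw [hsafeB]; simp [hja]
        · have hj : j = idd ∨ j = idd + 1 := by
            by_contra hc
            push Not at hc
            rw [bad_remove descOk r idd j hlt_d hbad_d hc.1 hc.2] at hjd
            cases hjd
          refine ⟨j, ?_, ?_⟩
          · rcases hj with rfl | rfl <;> simp
          · rw [hsafeB]; simp [hjd]
      · rintro ⟨c, hcmem, hcs⟩
        have hlt_a := firstBad_some_lt ascOk r ia hia
        have hlt_d := firstBad_some_lt descOk r idd hidd
        have hc : c < r.length := by
          simp at hcmem
          rcases hcmem with rfl | rfl | rfl | rfl <;> omega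
        refine ⟨c, List.mem_range.mpr hc, ?_⟩
        rw [hsafeB] at hcs
        exact hcs

-- ===== VERDICT (by name: the statement is the Claim_ definition above) =====
theorem get_report_dampened_safety_spec : Claim_equal_get_report_dampened_safety := by
  intro input _
  unfold Spec_get_report_dampened_safety get_report_dampened_safety get_report_dampened_safety_alt
  exact List.map_eq_map_iff.mpr (fun r _ => report_eq r)
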